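-- pv_equiv track=rewrite | github.com/KedharAdithya/6Companies30Days | Goldman Sachs/Day7/6.Minimum Consecutive Cards to Pick Up.py | minimumCardPickup
-- ===== SOURCE A (Python) =====
-- from typing import List
--
-- def minimumCardPickup(a: List[int]) -> int:
--     d=set()
--     s={}
--     n=len(a)
--     for i in range(n):
--         if a[i] in s:
--             d.add(a[i])
--             s[a[i]].append(i)
--         else:
--             s[a[i]]=[i]
--     if len(d)==0:
--         return -1
--     for i in d:
--         for j in range(len(s[i])-1):
--             n=min(n,s[i][j+1]-s[i][j])
--     return n+1
-- ===== SOURCE B (Python) =====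
-- def minimumCardPickup(a):
--     best = None
--     last = {}
--     for i, v in enumerate(a):
--         if v in last:
--             g = i - last[v]
--             if best is None or g < best:
--                 best = g
--         last[v] = i
--     return -1 if best is None else best + 1
-- ===== Notes on version B (the rewrite author's own statement) =====
-- stated objective: simpler
-- what changed: Replaces A's two-phase scheme (group all occurrence indices per value into lists, then a second nested loop over the duplicate set computing adjacent gaps) with a single pass that keeps only the last index of each value and the running minimum gap.
import Mathlib
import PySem

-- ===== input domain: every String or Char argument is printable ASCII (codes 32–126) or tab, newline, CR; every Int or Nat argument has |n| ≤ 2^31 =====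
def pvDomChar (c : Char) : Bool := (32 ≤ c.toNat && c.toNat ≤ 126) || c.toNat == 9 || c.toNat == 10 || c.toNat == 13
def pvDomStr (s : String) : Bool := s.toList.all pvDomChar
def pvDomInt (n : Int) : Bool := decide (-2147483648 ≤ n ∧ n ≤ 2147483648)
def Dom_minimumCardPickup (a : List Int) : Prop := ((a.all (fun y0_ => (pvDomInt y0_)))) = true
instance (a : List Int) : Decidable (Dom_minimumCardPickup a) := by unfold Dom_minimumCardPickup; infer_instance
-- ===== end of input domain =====

-- B changes A's two-phase algorithm (group all occurrence indices per value, then scan the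
-- duplicate set for adjacent gaps) into a single pass keeping only each value's last index
-- and the running minimum gap; objective: simpler.

-- ===== PORT A =====
-- loop body of A's first pass: d=set of duplicated values, s=dict value -> list of indices
def pvStepA (st : PySem.Set Int × PySem.Dict Int (List Int)) (p : Int × Int) :
    PySem.Set Int × PySem.Dict Int (List Int) :=
  match st with
  | (d, s) =>
    if s.contains p.2 then (PySem.Set.add d p.2, s.modify p.2 [] (· ++ [p.1]))
    else (d, s.insert p.2 [p.1])

def minimumCardPickup (a : List Int) : Int :=
  let st := (PySem.List.enumerate a).foldl pvStepA (PySem.Set.empty, PySem.Dict.empty)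
  let d := st.1
  let s := st.2
  if PySem.Set.len d = 0 then -1
  else
    -- 'for i in d: for j in range(len(s[i])-1): n = min(n, s[i][j+1]-s[i][j])'; a min-fold,
    -- so the (unmodelled) set iteration order cannot affect the result
    (d.foldl (fun n v =>
        (PySem.List.pyRange 0 (((s.getD v []).length : Int) - 1) 1).foldl
          (fun n j => min n (PySem.List.pyGetD (s.getD v []) (j + 1) 0 -
                             PySem.List.pyGetD (s.getD v []) j 0)) n)
      (a.length : Int)) + 1

-- ===== PORT B =====
-- loop body of B: best = running minimum gap (None = no duplicate yet), last = value -> last index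
def pvStepB (st : Option Int × PySem.Dict Int Int) (p : Int × Int) :
    Option Int × PySem.Dict Int Int :=
  match st with
  | (best, last) =>
    let best' :=
      match last.get? p.2 with
      | some j =>
        let g := p.1 - j
        match best with
        | none => some g
        | some b => if g < b then some g else some b
      | none => best
    (best', last.insert p.2 p.1)

def minimumCardPickup_alt (a : List Int) : Int :=
  let st := (PySem.List.enumerate a).foldl pvStepB (none, PySem.Dict.empty)
  match st.1 with
  | none => -1
  | some b => b + 1

-- ===== PRECONDITION & SPEC =====
def Spec_minimumCardPickup (a : List Int) (out : Int) : Prop := out = minimumCardPickup_alt a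
instance (a : List Int) (out : Int) : Decidable (Spec_minimumCardPickup a out) := by unfold Spec_minimumCardPickup; infer_instance

-- ===== CLAIM (what is proved, stated in full; the proofs are below) =====
def Claim_equal_minimumCardPickup : Prop := ∀ (a : List Int), Dom_minimumCardPickup a → Spec_minimumCardPickup a (minimumCardPickup a)

-- ===== LEMMAS AND PROOFS =====

-- adjacent gaps of an index list
def pvGaps : List Int → List Int
  | [] => []
  | [_] => []
  | x :: y :: t => (y - x) :: pvGaps (y :: t)

-- A's second phase, rewritten structurally
def pvPhase2 (s : PySem.Dict Int (List Int)) (d : List Int) (m : Int) : Int :=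
  d.foldl (fun n v => (pvGaps (s.getD v [])).foldl min n) m

-- B's merge of the running minimum
def pvMM (best : Option Int) (m : Int) : Int :=
  match best with
  | none => m
  | some b => min m b

lemma pvMM_none (m : Int) : pvMM none m = m := rfl

lemma pvMM_some (b m : Int) : pvMM (some b) m = min m b := rfl

-- the index loop over range(len-1) is the fold of the gap list
lemma pv_range_fold : ∀ (l : List Int) (n : Int),
    (List.range (l.length - 1)).foldl (fun n j => min n (l.getD (j + 1) 0 - l.getD j 0)) n
      = (pvGaps l).foldl min n
  | [], _ => rfl
  | [_], _ => rfl
  | a :: b :: t, n => by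
      have h1 : (a :: b :: t).length - 1 = t.length + 1 := by simp
      rw [h1, List.range_succ_eq_map, List.foldl_cons, List.foldl_map]
      have ih := pv_range_fold (b :: t) (min n (b - a))
      have h2 : (b :: t).length - 1 = t.length := by simp
      rw [h2] at ih
      simp only [Nat.succ_eq_add_one, List.getD_cons_succ, List.getD_cons_zero] at ih ⊢
      rw [ih]
      rfl

-- the inner index loop of A computes the fold of the gap list
lemma pv_inner_eq (l : List Int) (n : Int) :
    (PySem.List.pyRange 0 ((l.length : Int) - 1) 1).foldl
      (fun n j => min n (PySem.List.pyGetD l (j + 1) 0 - PySem.List.pyGetD l j 0)) n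
    = (pvGaps l).foldl min n := by
  have h1 : ((l.length : Int) - 1).toNat = l.length - 1 := by omega
  rw [PySem.List.pyRange_one, List.foldl_map, sub_zero, h1]
  have h2 : (fun (n : Int) (j : Nat) =>
      min n (PySem.List.pyGetD l ((0 : Int) + (j : Int) + 1) 0 -
             PySem.List.pyGetD l ((0 : Int) + (j : Int)) 0)) =
      (fun (n : Int) (j : Nat) => min n (l.getD (j + 1) 0 - l.getD j 0)) := by
    funext n j
    have e1 : (0 : Int) + (j : Int) + 1 = ((j + 1 : Nat) : Int) := by push_cast; ring
    have e2 : (0 : Int) + (j : Int) = ((j : Nat) : Int) := zero_add _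
    rw [e1, e2, PySem.List.pyGetD_natCast, PySem.List.pyGetD_natCast]
  rw [h2]
  exact pv_range_fold l n

lemma pv_foldl_min_min (L : List Int) (n g : Int) :
    L.foldl min (min n g) = min (L.foldl min n) g := by
  induction L generalizing n with
  | nil => rfl
  | cons x t ih => simp only [List.foldl_cons]
                   rw [min_right_comm, ih]

lemma pv_phase2_cons (s : PySem.Dict Int (List Int)) (v : Int) (t : List Int) (m : Int) :
    pvPhase2 s (v :: t) m = pvPhase2 s t ((pvGaps (s.getD v [])).foldl min m) := rfl

lemma pv_phase2_min (s : PySem.Dict Int (List Int)) (d : List Int) (m g : Int) :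
    pvPhase2 s d (min m g) = min (pvPhase2 s d m) g := by
  induction d generalizing m with
  | nil => rfl
  | cons v t ih => rw [pv_phase2_cons, pv_phase2_cons, pv_foldl_min_min, ih]

lemma pv_phase2_congr (s s' : PySem.Dict Int (List Int)) (d : List Int) (m : Int)
    (h : ∀ u ∈ d, s'.getD u [] = s.getD u []) :
    pvPhase2 s' d m = pvPhase2 s d m := by
  induction d generalizing m with
  | nil => rfl
  | cons v t ih =>
      rw [pv_phase2_cons, pv_phase2_cons, h v (by simp),
        ih _ (fun u hu => h u (List.mem_cons_of_mem _ hu))]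

lemma pv_phase2_update (s s' : PySem.Dict Int (List Int)) (d : List Int) (m g v : Int)
    (hv : v ∈ d) (hnd : d.Nodup)
    (hgv : pvGaps (s'.getD v []) = pvGaps (s.getD v []) ++ [g])
    (hne : ∀ u ∈ d, u ≠ v → s'.getD u [] = s.getD u []) :
    pvPhase2 s' d m = min (pvPhase2 s d m) g := by
  induction d generalizing m with
  | nil => cases hv
  | cons u t ih =>
      rcases List.mem_cons.1 hv with h | h
      · subst h
        rw [pv_phase2_cons, pv_phase2_cons, hgv, List.foldl_append, List.foldl_cons,
          List.foldl_nil]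
        have hnotin : v ∉ t := (List.nodup_cons.1 hnd).1
        have hc : ∀ w ∈ t, s'.getD w [] = s.getD w [] := by
          intro w hw
          exact hne w (List.mem_cons_of_mem _ hw) (fun e => hnotin (e ▸ hw))
        rw [pv_phase2_congr s s' t _ hc, pv_phase2_min]
      · by_cases he : u = v
        · subst he; exact absurd h (List.nodup_cons.1 hnd).1
        · rw [pv_phase2_cons, pv_phase2_cons, hne u (by simp) he]
          exact ih _ h (List.nodup_cons.1 hnd).2
            (fun w hw hne' => hne w (List.mem_cons_of_mem _ hw) hne')

lemma pv_phase2_append (s : PySem.Dict Int (List Int)) (d : List Int) (v : Int) (m : Int) :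
    pvPhase2 s (d ++ [v]) m = (pvGaps (s.getD v [])).foldl min (pvPhase2 s d m) := by
  simp [pvPhase2, List.foldl_append]

-- the joint loop invariant
def pvInv (i : Int) (d : PySem.Set Int) (s : PySem.Dict Int (List Int))
    (best : Option Int) (last : PySem.Dict Int Int) : Prop :=
  0 ≤ i ∧
  (∀ v, (last.get? v).isSome = s.contains v) ∧
  (∀ v j, last.get? v = some j → (s.getD v []).getLast? = some j) ∧
  (∀ v j, last.get? v = some j → 0 ≤ j ∧ j < i) ∧
  (∀ v ∈ d, s.contains v = true ∧ 2 ≤ (s.getD v []).length) ∧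
  (∀ v, v ∉ d → s.contains v = true → (s.getD v []).length = 1) ∧
  (∀ m, pvPhase2 s d m = pvMM best m) ∧
  (∀ b, best = some b → 1 ≤ b ∧ b < i) ∧
  (d = [] ↔ best = none) ∧
  d.Nodup

lemma pv_gaps_append (l : List Int) (j x : Int) (h : l.getLast? = some j) :
    pvGaps (l ++ [x]) = pvGaps l ++ [x - j] := by
  induction l generalizing j with
  | nil => simp at h
  | cons a t ih =>
      cases t with
      | nil => simp at h; subst h; rfl
      | cons b u =>
          have h' : (b :: u).getLast? = some j := by
            rwa [List.getLast?_cons_cons] at h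
          have e : pvGaps ((a :: b :: u) ++ [x]) = (b - a) :: pvGaps ((b :: u) ++ [x]) := rfl
          rw [e, ih j h']
          rfl


lemma pv_step (i x : Int) (d : PySem.Set Int) (s : PySem.Dict Int (List Int))
    (best : Option Int) (last : PySem.Dict Int Int) (h : pvInv i d s best last) :
    pvInv (i + 1) (pvStepA (d, s) (i, x)).1 (pvStepA (d, s) (i, x)).2
      (pvStepB (best, last) (i, x)).1 (pvStepB (best, last) (i, x)).2 := by
  obtain ⟨h0, h1, h2, h3, h4, h5, h6, h7, h8, h9⟩ := h
  by_cases hc : s.contains x = true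
  · -- x already seen
    have hs : (last.get? x).isSome = true := by rw [h1]; exact hc
    obtain ⟨j, hj⟩ := Option.isSome_iff_exists.mp hs
    have hlast : (s.getD x []).getLast? = some j := h2 x j hj
    have hlne : s.getD x [] ≠ [] := by
      intro e; rw [e] at hlast; simp at hlast
    have hjb := h3 x j hj
    have hgaps : pvGaps ((s.modify x [] (· ++ [i])).getD x []) =
        pvGaps (s.getD x []) ++ [i - j] := by
      rw [PySem.Dict.getD_modify, if_pos rfl]
      exact pv_gaps_append _ j i hlast
    have hgd : ∀ u, u ≠ x →
        (s.modify x [] (· ++ [i])).getD u [] = s.getD u [] := by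
      intro u hu; rw [PySem.Dict.getD_modify, if_neg hu]
    have hxgd : (s.modify x [] (· ++ [i])).getD x [] = s.getD x [] ++ [i] := by
      rw [PySem.Dict.getD_modify, if_pos rfl]
    simp only [pvStepA, pvStepB, hc, if_true, hj]
    have hcomA : ∀ v, ((s.modify x [] (· ++ [i])).contains v) = ((v == x) || s.contains v) :=
      fun v => PySem.Dict.contains_modify s x v [] _
    -- the shared dict/bookkeeping components
    have c0 : (0:Int) ≤ i + 1 := by omega
    have c1 : ∀ v, ((last.insert x i).get? v).isSome =
        (s.modify x [] (· ++ [i])).contains v := by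
      intro v
      rw [PySem.Dict.get?_insert, hcomA]
      by_cases hv : v = x
      · simp [hv]
      · simp only [if_neg hv, h1 v]
        have : (v == x) = false := by simp [hv]
        rw [this]; simp
    have c2 : ∀ v j', (last.insert x i).get? v = some j' →
        ((s.modify x [] (· ++ [i])).getD v []).getLast? = some j' := by
      intro v j' hvj
      rw [PySem.Dict.get?_insert] at hvj
      by_cases hv : v = x
      · rw [if_pos hv] at hvj
        cases hvj
        rw [hv, hxgd]
        exact List.getLast?_concat
      · rw [if_neg hv] at hvj
        rw [hgd v hv]
        exact h2 v j' hvj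
    have c3 : ∀ v j', (last.insert x i).get? v = some j' → 0 ≤ j' ∧ j' < i + 1 := by
      intro v j' hvj
      rw [PySem.Dict.get?_insert] at hvj
      by_cases hv : v = x
      · rw [if_pos hv] at hvj; cases hvj; omega
      · rw [if_neg hv] at hvj; have := h3 v j' hvj; omega
    by_cases hxd : x ∈ d
    · -- second or later duplicate of x: d unchanged
      have hdne : d ≠ [] := by intro e; rw [e] at hxd; cases hxd
      obtain ⟨b, hb⟩ : ∃ b, best = some b := by
        cases hbest : best with
        | none => exact absurd (h8.mpr hbest) hdne
        | some b => exact ⟨b, rfl⟩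
      subst hb
      rw [PySem.Set.add_of_mem hxd]
      refine ⟨c0, c1, c2, c3, ?_, ?_, ?_, ?_, ?_, h9⟩
      · intro v hv
        constructor
        · rw [hcomA]; rcases (h4 v hv) with ⟨hc1, _⟩; rw [hc1]; simp
        · by_cases he : v = x
          · rw [he, hxgd]
            have := (h4 x hxd).2
            simp only [List.length_append, List.length_cons, List.length_nil]
            omega
          · rw [hgd v he]; exact (h4 v hv).2
      · intro v hvd hvc
        have he : v ≠ x := fun e => hvd (e ▸ hxd)
        rw [hgd v he]
        rw [hcomA] at hvc
        have : (v == x) = false := by simp [he]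
        rw [this] at hvc; simp at hvc
        exact h5 v hvd hvc
      · intro m
        have := pv_phase2_update s (s.modify x [] (· ++ [i])) d m (i - j) x hxd h9 hgaps
          (fun u _ hu => hgd u hu)
        rw [this, h6 m, pvMM_some]
        simp only []
        by_cases hlt : i - j < b
        · simp only [if_pos hlt, pvMM_some]; omega
        · simp only [if_neg hlt, pvMM_some]; omega
      · intro b' hb'
        simp only [] at hb'
        have := h7 b rfl
        by_cases hlt : i - j < b
        · rw [if_pos hlt] at hb'; cases hb'; omega
        · rw [if_neg hlt] at hb'; cases hb'; omega
      · constructor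
        · intro e; exact absurd e hdne
        · intro e
          simp only [] at e
          by_cases hlt : i - j < b
          · rw [if_pos hlt] at e; simp at e
          · rw [if_neg hlt] at e; simp at e
    · -- first duplicate of x: x is appended to d
      have hxl : s.getD x [] = [j] := by
        have hlen := h5 x hxd hc
        cases hl : s.getD x [] with
        | nil => exact absurd hl hlne
        | cons y ys =>
            rw [hl] at hlen
            cases ys with
            | nil =>
                rw [hl] at hlast
                simp only [List.getLast?_singleton, Option.some.injEq] at hlast
                rw [hlast]
            | cons z zs => simp at hlen
      rw [PySem.Set.add_of_not_mem hxd]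
      have hnodup : (d ++ [x]).Nodup := by
        simp [List.nodup_append, h9]
        intro a ha e
        exact hxd (e ▸ ha)
      have hmem : ∀ v, v ∈ d ++ [x] ↔ v ∈ d ∨ v = x := by
        intro v; simp [List.mem_append]
      refine ⟨c0, c1, c2, c3, ?_, ?_, ?_, ?_, ?_, hnodup⟩
      · intro v hv
        rcases (hmem v).mp hv with hvd | hve
        · have he : v ≠ x := fun e => hxd (e ▸ hvd)
          refine ⟨?_, ?_⟩
          · rw [hcomA]; rw [(h4 v hvd).1]; simp
          · rw [hgd v he]; exact (h4 v hvd).2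
        · subst hve
          refine ⟨?_, ?_⟩
          · rw [hcomA]; simp
          · rw [hxgd, hxl]; simp
      · intro v hvd hvc
        have hv1 : v ∉ d := fun e => hvd ((hmem v).mpr (Or.inl e))
        have he : v ≠ x := fun e => hvd ((hmem v).mpr (Or.inr e))
        rw [hgd v he]
        rw [hcomA] at hvc
        have : (v == x) = false := by simp [he]
        rw [this] at hvc; simp at hvc
        exact h5 v hv1 hvc
      · intro m
        rw [pv_phase2_append, pv_phase2_congr s (s.modify x [] (· ++ [i])) d _
          (fun u hu => hgd u (fun e => hxd (e ▸ hu))), h6 m, hgaps, hxl]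
        simp only [pvGaps, List.nil_append, List.foldl_cons, List.foldl_nil]
        cases best with
        | none => simp only []; rw [pvMM_none, pvMM_some]
        | some b =>
            simp only []
            rw [pvMM_some]
            by_cases hlt : i - j < b
            · simp only [if_pos hlt, pvMM_some]; omega
            · simp only [if_neg hlt, pvMM_some]; omega
      · intro b' hb'
        cases hbest : best with
        | none => rw [hbest] at hb'; simp only [] at hb'; cases hb'; omega
        | some b =>
            rw [hbest] at hb'
            simp only [] at hb'
            have := h7 b hbest
            by_cases hlt : i - j < b
            · rw [if_pos hlt] at hb'; cases hb'; omega
            · rw [if_neg hlt] at hb'; cases hb'; omega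
      · constructor
        · intro e; simp at e
        · intro e
          cases hbest : best with
          | none => rw [hbest] at e; simp at e
          | some b =>
              rw [hbest] at e
              simp only [] at e
              by_cases hlt : i - j < b
              · rw [if_pos hlt] at e; simp at e
              · rw [if_neg hlt] at e; simp at e
  · -- first occurrence of x
    have hcf : s.contains x = false := by simpa using hc
    have hnone : last.get? x = none := by
      have := h1 x
      rw [hcf] at this
      simpa using this
    simp only [pvStepA, pvStepB, hcf, Bool.false_eq_true, if_false, hnone]
    have hxd : x ∉ d := by
      intro hv
      exact hc (h4 x hv).1
    have hgd : ∀ u, u ≠ x → (s.insert x [i]).getD u [] = s.getD u [] := by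
      intro u hu; rw [PySem.Dict.getD_insert, if_neg hu]
    refine ⟨by omega, ?_, ?_, ?_, ?_, ?_, ?_, ?_, h8, h9⟩
    · intro v
      rw [PySem.Dict.get?_insert, PySem.Dict.contains_insert]
      by_cases hv : v = x
      · simp [hv]
      · have : (v == x) = false := by simp [hv]
        rw [if_neg hv, this]
        simp [h1 v]
    · intro v j' hvj
      rw [PySem.Dict.get?_insert] at hvj
      by_cases hv : v = x
      · rw [if_pos hv] at hvj; cases hvj
        rw [hv, PySem.Dict.getD_insert_self]
        rfl
      · rw [if_neg hv] at hvj
        rw [hgd v hv]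
        exact h2 v j' hvj
    · intro v j' hvj
      rw [PySem.Dict.get?_insert] at hvj
      by_cases hv : v = x
      · rw [if_pos hv] at hvj; cases hvj; omega
      · rw [if_neg hv] at hvj; have := h3 v j' hvj; omega
    · intro v hv
      have he : v ≠ x := fun e => hxd (e ▸ hv)
      refine ⟨?_, ?_⟩
      · rw [PySem.Dict.contains_insert, (h4 v hv).1]; simp
      · rw [hgd v he]; exact (h4 v hv).2
    · intro v hvd hvc
      by_cases hv : v = x
      · rw [hv, PySem.Dict.getD_insert_self]; rfl
      · rw [hgd v hv]
        rw [PySem.Dict.contains_insert] at hvc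
        have : (v == x) = false := by simp [hv]
        rw [this] at hvc; simp at hvc
        exact h5 v hvd hvc
    · intro m
      rw [pv_phase2_congr s (s.insert x [i]) d m
        (fun u hu => hgd u (fun e => hxd (e ▸ hu)))]
      exact h6 m
    · intro b' hb'
      have := h7 b' hb'; omega

lemma pv_loop (l : List Int) (i : Int) (d : PySem.Set Int) (s : PySem.Dict Int (List Int))
    (best : Option Int) (last : PySem.Dict Int Int)
    (h : pvInv i d s best last) :
    pvInv (i + l.length)
      ((PySem.List.enumerate l i).foldl pvStepA (d, s)).1
      ((PySem.List.enumerate l i).foldl pvStepA (d, s)).2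
      ((PySem.List.enumerate l i).foldl pvStepB (best, last)).1
      ((PySem.List.enumerate l i).foldl pvStepB (best, last)).2 := by
  induction l generalizing i d s best last with
  | nil => simpa using h
  | cons x t ih =>
      have hstep := pv_step i x d s best last h
      have hrec := ih (i + 1) (pvStepA (d, s) (i, x)).1 (pvStepA (d, s) (i, x)).2
        (pvStepB (best, last) (i, x)).1 (pvStepB (best, last) (i, x)).2 hstep
      rw [PySem.List.enumerate_cons]
      simp only [List.foldl_cons, List.length_cons]
      have e : i + ((t.length + 1 : Nat) : Int) = (i + 1) + (t.length : Int) := by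
        push_cast; ring
      rw [e]
      simpa using hrec

-- ===== VERDICT (by name: the statement is the Claim_ definition above) =====
theorem minimumCardPickup_spec : Claim_equal_minimumCardPickup := by
  unfold Claim_equal_minimumCardPickup
  intro a _
  unfold Spec_minimumCardPickup
  have hinv0 : pvInv 0 PySem.Set.empty PySem.Dict.empty none PySem.Dict.empty := by
    refine ⟨le_refl 0, ?_, ?_, ?_, ?_, ?_, ?_, ?_, ?_, List.nodup_nil⟩
    · intro v; simp [PySem.Dict.get?_empty, PySem.Dict.contains_empty]
    · intro v j hv; simp [PySem.Dict.get?_empty] at hv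
    · intro v j hv; simp [PySem.Dict.get?_empty] at hv
    · intro v hv; cases hv
    · intro v _ hc; simp [PySem.Dict.contains_empty] at hc
    · intro m; rfl
    · intro b hb; cases hb
    · simp [PySem.Set.empty]
  have hloop := pv_loop a 0 PySem.Set.empty PySem.Dict.empty none PySem.Dict.empty hinv0
  rw [zero_add] at hloop
  obtain ⟨g0, g1, g2, g3, g4, g5, g6, g7, g8, g9⟩ := hloop
  simp only [minimumCardPickup, minimumCardPickup_alt]
  by_cases hd : ((PySem.List.enumerate a 0).foldl pvStepA (PySem.Set.empty, PySem.Dict.empty)).1 = []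
  · have hb : ((PySem.List.enumerate a 0).foldl pvStepB (none, PySem.Dict.empty)).1 = none :=
      g8.mp hd
    rw [hb]
    have hlen : PySem.Set.len ((PySem.List.enumerate a 0).foldl pvStepA
        (PySem.Set.empty, PySem.Dict.empty)).1 = 0 := by
      rw [hd]; rfl
    rw [if_pos hlen]
  · obtain ⟨b, hb⟩ : ∃ b, ((PySem.List.enumerate a 0).foldl pvStepB
        (none, PySem.Dict.empty)).1 = some b := by
      cases hbb : ((PySem.List.enumerate a 0).foldl pvStepB (none, PySem.Dict.empty)).1 with
      | none => exact absurd (g8.mpr hbb) hd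
      | some b => exact ⟨b, rfl⟩
    rw [hb]
    have hlen : ¬ PySem.Set.len ((PySem.List.enumerate a 0).foldl pvStepA
        (PySem.Set.empty, PySem.Dict.empty)).1 = 0 := by
      intro e
      have e' : ((PySem.List.enumerate a 0).foldl pvStepA
          (PySem.Set.empty, PySem.Dict.empty)).1.length = 0 := by
        simpa [PySem.Set.len] using e
      exact hd (List.length_eq_zero_iff.mp e')
    rw [if_neg hlen]
    have hfun : (fun (n v : Int) =>
        (PySem.List.pyRange 0
          (((((PySem.List.enumerate a 0).foldl pvStepA (PySem.Set.empty, PySem.Dict.empty)).2.getD v []).length : Int) - 1) 1).foldl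
          (fun n j => min n
            (PySem.List.pyGetD (((PySem.List.enumerate a 0).foldl pvStepA (PySem.Set.empty, PySem.Dict.empty)).2.getD v []) (j + 1) 0 -
             PySem.List.pyGetD (((PySem.List.enumerate a 0).foldl pvStepA (PySem.Set.empty, PySem.Dict.empty)).2.getD v []) j 0)) n) =
        (fun (n v : Int) =>
          (pvGaps (((PySem.List.enumerate a 0).foldl pvStepA (PySem.Set.empty, PySem.Dict.empty)).2.getD v [])).foldl min n) := by
      funext n v
      exact pv_inner_eq _ n
    rw [hfun]
    have hph : pvPhase2
        ((PySem.List.enumerate a 0).foldl pvStepA (PySem.Set.empty, PySem.Dict.empty)).2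
        ((PySem.List.enumerate a 0).foldl pvStepA (PySem.Set.empty, PySem.Dict.empty)).1
        (a.length : Int) = b := by
      rw [g6 (a.length : Int), hb, pvMM_some]
      have hbb := g7 b hb
      omega
    exact congrArg (fun z => z + 1) hph
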